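-- pv_equiv track=rewrite | github.com/pritamleo841/GFG-CODE-SOLUTIONS-PYTHON | Difficulty: Medium/Maximize The Array/maximize-the-array.py | maximizeArray
-- ===== SOURCE A (Python) =====
-- import heapq
--
-- def maximizeArray(arr1, arr2, n):
--     #Get elements in max-heap
--     pq=[]
--     for i in range(n):
--         heapq.heappush(pq,-arr2[i])
--         heapq.heappush(pq,-arr1[i])
--     #Get n unique elements from max-heap to set
--     seen=set()
--     while len(seen)!=n:
--         elem = -heapq.heappop(pq)
--         seen.add(elem)
--     #First pick elements from arr2 then from arr1 that are in set
--     res=[]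
--     for elem in arr2:
--         if elem in seen:
--             res.append(elem)
--             seen.remove(elem)
--     for elem in arr1:
--         if elem in seen:
--             res.append(elem)
--             seen.remove(elem)
--     return res
-- ===== SOURCE B (Python) =====
-- def maximizeArray(arr1, arr2, n):
--     # Top-n distinct values of arr1[:n] + arr2[:n] via one descending sort
--     # (indexing keeps A's IndexError when an array, or the distinct pool, is too short).
--     top = sorted({arr1[i] for i in range(n)} | {arr2[i] for i in range(n)}, reverse=True)
--     seen = {top[i] for i in range(n)}
--     res = []
--     for elem in arr2:
--         if elem in seen:
--             res.append(elem)
--             seen.remove(elem)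
--     for elem in arr1:
--         if elem in seen:
--             res.append(elem)
--             seen.remove(elem)
--     return res
-- ===== Notes on version B (the rewrite author's own statement) =====
-- stated objective: simpler
-- what changed: Replaces the max-heap build and pop-until-n-distinct loop by one descending sort of the combined distinct values, taking the top n as the seen set; the two output passes over arr2 then arr1 are kept.
import Mathlib
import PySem

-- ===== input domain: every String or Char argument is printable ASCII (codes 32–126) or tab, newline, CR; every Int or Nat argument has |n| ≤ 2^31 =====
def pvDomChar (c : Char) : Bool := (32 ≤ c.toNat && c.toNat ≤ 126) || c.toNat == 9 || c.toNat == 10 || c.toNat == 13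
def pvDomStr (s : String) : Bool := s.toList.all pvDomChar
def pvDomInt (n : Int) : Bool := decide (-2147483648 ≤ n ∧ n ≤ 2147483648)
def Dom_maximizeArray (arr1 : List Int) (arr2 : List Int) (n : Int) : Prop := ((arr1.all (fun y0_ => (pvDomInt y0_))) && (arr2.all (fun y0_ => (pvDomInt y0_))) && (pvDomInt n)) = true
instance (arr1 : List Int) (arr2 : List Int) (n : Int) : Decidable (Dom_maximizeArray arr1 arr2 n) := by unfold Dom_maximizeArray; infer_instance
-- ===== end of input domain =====

-- B replaces A's heap build + pop-until-n-distinct by one descending sort of the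
-- distinct values (objective: simpler); the two output passes are kept.

-- ===== PORT A =====
-- The heapq heap is modelled by the MULTISET of its entries: heappop returns the
-- minimum entry, and for Int entries the popped VALUE depends only on the multiset,
-- so push = cons and pop = (value = minimum, rest = erase first minimum) are
-- value-exact for this program.

-- while len(seen) != n: seen.add(-heappop(pq)); fuel = pq.length (each pop shrinks pq);
-- when the heap is empty Python raises IndexError (excluded by Pre_), here: seen.
def pvPopLoop (fuel : Nat) (pq : List Int) (seen : PySem.Set Int) (n : Int) : PySem.Set Int :=
  match fuel with
  | 0 => seen
  | f + 1 =>
    if (seen.length : Int) = n then seen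
    else
      match PySem.List.min? pq (fun x => x) with
      | none => seen
      | some m => pvPopLoop f (pq.erase m) (PySem.Set.add seen (-m)) n

-- the identical output loop of both Pythons: 'for elem in xs: if elem in seen: res.append(elem); seen.remove(elem)'
def pvPick (xs : List Int) (st : List Int × PySem.Set Int) : List Int × PySem.Set Int :=
  xs.foldl (fun st elem =>
    if PySem.Set.contains st.2 elem then (st.1 ++ [elem], PySem.Set.discard st.2 elem) else st) st

def maximizeArray (arr1 : List Int) (arr2 : List Int) (n : Int) : List Int :=
  let pq := (PySem.List.pyRange 0 n 1).foldl
    (fun pq i => (-(PySem.List.pyGetD arr1 i 0)) :: (-(PySem.List.pyGetD arr2 i 0)) :: pq) []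
  let seen := pvPopLoop pq.length pq PySem.Set.empty n
  let st := pvPick arr1 (pvPick arr2 ([], seen))
  st.1

-- ===== PORT B =====
-- the set comprehensions '{xs[i] for i in range(n)}' are the foldl of Set.add over
-- range(n); where Python's xs[i] raises IndexError (excluded by Pre_) pyGetD reads 0
def maximizeArray_alt (arr1 : List Int) (arr2 : List Int) (n : Int) : List Int :=
  let top := PySem.List.sorted
    (PySem.Set.union
      ((PySem.List.pyRange 0 n 1).foldl
        (fun s i => PySem.Set.add s (PySem.List.pyGetD arr1 i 0)) PySem.Set.empty)
      ((PySem.List.pyRange 0 n 1).foldl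
        (fun s i => PySem.Set.add s (PySem.List.pyGetD arr2 i 0)) PySem.Set.empty))
    (fun x => x) true
  let seen := (PySem.List.pyRange 0 n 1).foldl
    (fun s i => PySem.Set.add s (PySem.List.pyGetD top i 0)) PySem.Set.empty
  let st := pvPick arr1 (pvPick arr2 ([], seen))
  st.1

-- ===== PRECONDITION & SPEC =====
-- Pre_ = exactly the inputs where the Python A returns: it raises IndexError when
-- n < 0, n exceeds an array length, or fewer than n distinct values occur among
-- the first n of each array (the heap is exhausted before n distinct pops).
def Pre_maximizeArray (arr1 : List Int) (arr2 : List Int) (n : Int) : Prop :=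
  0 ≤ n ∧ n ≤ arr1.length ∧ n ≤ arr2.length ∧
  n ≤ (PySem.Set.ofList (arr1.take n.toNat ++ arr2.take n.toNat)).length
instance (arr1 : List Int) (arr2 : List Int) (n : Int) : Decidable (Pre_maximizeArray arr1 arr2 n) := by unfold Pre_maximizeArray; infer_instance

def pvWitness_maximizeArray : List Int × List Int × Int := ([3, 1], [2, 4], 2)

def Spec_maximizeArray (arr1 : List Int) (arr2 : List Int) (n : Int) (out : List Int) : Prop := out = maximizeArray_alt arr1 arr2 n
instance (arr1 : List Int) (arr2 : List Int) (n : Int) (out : List Int) : Decidable (Spec_maximizeArray arr1 arr2 n out) := by unfold Spec_maximizeArray; infer_instance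

-- ===== CLAIM (what is proved, stated in full; the proofs are below) =====
def Claim_equal_maximizeArray : Prop := ∀ (arr1 : List Int) (arr2 : List Int) (n : Int), Dom_maximizeArray arr1 arr2 n → Pre_maximizeArray arr1 arr2 n → Spec_maximizeArray arr1 arr2 n (maximizeArray arr1 arr2 n)

-- ===== LEMMAS AND PROOFS =====

-- helper spec for the pop loop: consume the ascending list, adding negations, until n distinct
def pvCollect (l : List Int) (seen : PySem.Set Int) (n : Int) : PySem.Set Int :=
  match l with
  | [] => seen
  | m :: t => if (seen.length : Int) = n then seen else pvCollect t (PySem.Set.add seen (-m)) n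

lemma pvSortedEraseMin (pq : List Int) (m : Int) (h : PySem.List.min? pq (fun x => x) = some m) :
    PySem.List.sorted pq (fun x => x) false = m :: PySem.List.sorted (pq.erase m) (fun x => x) false := by
  apply PySem.List.sorted_id_eq_of_perm_of_pairwise
  · exact ((PySem.List.sorted_perm _ _ _).cons m).trans (List.perm_cons_erase (PySem.List.min?_mem h)).symm
  · refine List.pairwise_cons.mpr ⟨?_, PySem.List.sorted_pairwise _ _⟩
    intro y hy
    exact PySem.List.min?_isMin h y (List.mem_of_mem_erase ((PySem.List.mem_sorted _ _ _ y).mp hy))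

lemma pvPopLoop_eq_collect (n : Int) :
    ∀ (fuel : Nat) (pq : List Int) (seen : PySem.Set Int), pq.length = fuel →
      pvPopLoop fuel pq seen n = pvCollect (PySem.List.sorted pq (fun x => x) false) seen n := by
  intro fuel
  induction fuel with
  | zero =>
    intro pq seen h
    have hpq : pq = [] := List.eq_nil_of_length_eq_zero h
    subst hpq
    rw [(PySem.List.sorted_eq_nil_iff _ _ _).mpr rfl]
    rfl
  | succ f ih =>
    intro pq seen h
    have hne : pq ≠ [] := by intro e; subst e; simp at h
    obtain ⟨m, hm⟩ : ∃ m, PySem.List.min? pq (fun x => x) = some m := by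
      cases hmin : PySem.List.min? pq (fun x => x) with
      | none => exact absurd ((PySem.List.min?_eq_none_iff _ _).mp hmin) hne
      | some m => exact ⟨m, rfl⟩
    rw [pvSortedEraseMin pq m hm]
    show (if (seen.length : Int) = n then seen
          else match PySem.List.min? pq (fun x => x) with
               | none => seen
               | some m => pvPopLoop f (pq.erase m) (PySem.Set.add seen (-m)) n) = _
    rw [hm]
    by_cases hl : (seen.length : Int) = n
    · rw [if_pos hl]; rw [pvCollect, if_pos hl]
    · rw [if_neg hl]; rw [pvCollect, if_neg hl]
      exact ih (pq.erase m) _ (by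
        have := List.length_erase_of_mem (PySem.List.min?_mem hm)
        omega)

lemma pvFoldlAddPrefix : ∀ (l : List Int) (s : PySem.Set Int),
    s <+: l.foldl (fun s m => PySem.Set.add s (-m)) s := by
  intro l
  induction l with
  | nil => intro s; exact List.prefix_refl s
  | cons m t ih =>
    intro s
    have h1 : s <+: PySem.Set.add s (-m) := by
      rw [PySem.Set.add_eq_ite]
      split_ifs
      · exact List.prefix_refl s
      · exact List.prefix_append s [-m]
    exact h1.trans (ih (PySem.Set.add s (-m)))

lemma pvCollect_take (n : Int) (hn : 0 ≤ n) :
    ∀ (l : List Int) (seen : PySem.Set Int), seen.length ≤ n.toNat →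
      pvCollect l seen n = (l.foldl (fun s m => PySem.Set.add s (-m)) seen).take n.toNat := by
  intro l
  induction l with
  | nil => intro seen h; exact (List.take_of_length_le h).symm
  | cons m t ih =>
    intro seen h
    rw [pvCollect, List.foldl_cons]
    by_cases hl : (seen.length : Int) = n
    · rw [if_pos hl]
      have hp1 : seen <+: PySem.Set.add seen (-m) := by
        rw [PySem.Set.add_eq_ite]
        split_ifs
        · exact List.prefix_refl seen
        · exact List.prefix_append seen [-m]
      obtain ⟨r, hr⟩ := hp1.trans (pvFoldlAddPrefix t (PySem.Set.add seen (-m)))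
      rw [← hr]
      have hlen : seen.length = n.toNat := by omega
      rw [← hlen, List.take_left]
    · rw [if_neg hl]
      rw [ih]
      have : (PySem.Set.add seen (-m)).length ≤ seen.length + 1 := by
        rw [PySem.Set.add_eq_ite]; split_ifs <;> simp
      omega

lemma pvOfListSublist (l : List Int) : List.Sublist (PySem.Set.ofList l) l := by
  induction l using List.reverseRecOn with
  | nil => exact List.Sublist.refl _
  | append_singleton xs x ih =>
    rw [PySem.Set.ofList_append_singleton, PySem.Set.add_eq_ite]
    split_ifs
    · exact ih.trans (List.sublist_append_left xs [x])
    · exact List.Sublist.append ih (List.Sublist.refl [x])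

lemma pvMemFoldlCons (f g : Int → Int) :
    ∀ (l : List Int) (acc : List Int) (y : Int),
      y ∈ l.foldl (fun pq i => f i :: g i :: pq) acc ↔ y ∈ acc ∨ ∃ i ∈ l, y = f i ∨ y = g i := by
  intro l
  induction l with
  | nil => intro acc y; simp
  | cons j t ih =>
    intro acc y
    rw [List.foldl_cons, ih]
    simp only [List.mem_cons]
    constructor
    · rintro ((h | h | h) | ⟨i, hi, h⟩)
      · exact Or.inr ⟨j, by simp, Or.inl h⟩
      · exact Or.inr ⟨j, by simp, Or.inr h⟩
      · exact Or.inl h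
      · exact Or.inr ⟨i, by simp [hi], h⟩
    · rintro (h | ⟨i, hi, h⟩)
      · exact Or.inl (Or.inr (Or.inr h))
      · rcases hi with rfl | hi
        · rcases h with h | h
          · exact Or.inl (Or.inl h)
          · exact Or.inl (Or.inr (Or.inl h))
        · exact Or.inr ⟨i, hi, h⟩

lemma pvMemTakeIff (xs : List Int) (n : Int) (hn : 0 ≤ n) (h : n ≤ xs.length) (x : Int) :
    (∃ i : Int, (0 ≤ i ∧ i < n) ∧ x = PySem.List.pyGetD xs i 0) ↔ x ∈ xs.take n.toNat := by
  constructor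
  · rintro ⟨i, ⟨h0, hi⟩, rfl⟩
    rw [PySem.List.pyGetD_of_nonneg xs 0 h0]
    have hlt : i.toNat < n.toNat := by omega
    have hxs : i.toNat < xs.length := by omega
    have : xs.getD i.toNat 0 = (xs.take n.toNat)[i.toNat]'(by simp; omega) := by
      rw [List.getD_eq_getElem _ _ hxs, List.getElem_take]
    rw [this]
    exact List.getElem_mem _
  · intro hx
    obtain ⟨j, hj, hjx⟩ := List.getElem_of_mem hx
    have hjl : j < n.toNat ∧ j < xs.length := by
      have := hj; simp [List.length_take] at this; omega
    refine ⟨(j : Int), ⟨by omega, by omega⟩, ?_⟩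
    rw [PySem.List.pyGetD_of_nonneg xs 0 (by omega)]
    rw [Int.toNat_natCast, List.getD_eq_getElem _ _ hjl.2]
    rw [← hjx, List.getElem_take]

lemma pvMapGetDRange (xs : List Int) (n : Int) (hn : 0 ≤ n) (h : n ≤ xs.length) :
    (PySem.List.pyRange 0 n).map (fun i => PySem.List.pyGetD xs i 0) = xs.take n.toNat := by
  obtain ⟨k, rfl⟩ : ∃ k : Nat, n = (k : Int) := ⟨n.toNat, by omega⟩
  rw [PySem.List.pyRange_zero_natCast, List.map_map]
  apply List.ext_getElem
  · simp; omega
  · intro i hi1 hi2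
    simp only [List.length_map, List.length_range] at hi1
    have hil : i < xs.length := by omega
    simp [PySem.List.pyGetD_natCast, List.getElem?_eq_getElem hil]

lemma pvFoldAddGetD (xs : List Int) (n : Int) (hn : 0 ≤ n) (h : n ≤ xs.length) :
    (PySem.List.pyRange 0 n 1).foldl
      (fun s i => PySem.Set.add s (PySem.List.pyGetD xs i 0)) PySem.Set.empty
      = PySem.Set.ofList (xs.take n.toNat) := by
  rw [show (PySem.Set.empty : PySem.Set Int) = [] from rfl,
      ← PySem.Set.update_map_eq_foldl_add (PySem.List.pyRange 0 n 1)
        (fun i => PySem.List.pyGetD xs i 0) [],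
      PySem.Set.update_nil_left, pvMapGetDRange xs n hn h]

theorem maximizeArray_spec : Claim_equal_maximizeArray := by
  intro arr1 arr2 n _ hpre
  obtain ⟨hn, h1, h2, hd⟩ := hpre
  unfold Spec_maximizeArray maximizeArray maximizeArray_alt
  simp only [pvFoldAddGetD arr1 n hn h1, pvFoldAddGetD arr2 n hn h2]
  set pq := (PySem.List.pyRange 0 n 1).foldl
    (fun pq i => (-(PySem.List.pyGetD arr1 i 0)) :: (-(PySem.List.pyGetD arr2 i 0)) :: pq)
    ([] : List Int) with hpq
  set asc := PySem.List.sorted pq (fun x => x) false with hasc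
  set desc := asc.map (fun m => -m) with hdesc
  set distB : PySem.Set Int :=
    PySem.Set.union (PySem.Set.ofList (arr1.take n.toNat))
      (PySem.Set.ofList (arr2.take n.toNat)) with hdistB
  -- A's seen set is the first n.toNat entries of the deduped descending value list
  have hA : pvPopLoop pq.length pq PySem.Set.empty n = (PySem.Set.ofList desc).take n.toNat := by
    rw [pvPopLoop_eq_collect n pq.length pq PySem.Set.empty rfl, ← hasc,
        pvCollect_take n hn asc PySem.Set.empty (by simp [PySem.Set.empty])]
    rw [show (List.foldl (fun s m => PySem.Set.add s (-m)) PySem.Set.empty asc)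
          = PySem.Set.update [] desc by
      rw [hdesc, PySem.Set.update_map_eq_foldl_add]; rfl]
    rw [PySem.Set.update_nil_left]
  -- membership of the deduped descending list = membership of B's distinct set
  have hmem : ∀ x : Int, x ∈ PySem.Set.ofList desc ↔ x ∈ distB := by
    intro x
    rw [PySem.Set.mem_ofList, hdesc, hdistB]
    rw [PySem.Set.mem_union, PySem.Set.mem_ofList, PySem.Set.mem_ofList]
    constructor
    · intro hx
      obtain ⟨a, ha, hax⟩ := List.mem_map.mp hx
      have hxa : -x ∈ asc := by
        have : a = -x := by omega
        rwa [← this]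
      rw [hasc, PySem.List.mem_sorted, hpq] at hxa
      rw [pvMemFoldlCons _ _ _ _ (-x)] at hxa
      rcases hxa with h | ⟨i, hi, h⟩
      · simp at h
      · rw [PySem.List.mem_pyRange_one] at hi
        rcases h with h | h
        · exact Or.inl ((pvMemTakeIff arr1 n hn h1 x).mp ⟨i, hi, by omega⟩)
        · exact Or.inr ((pvMemTakeIff arr2 n hn h2 x).mp ⟨i, hi, by omega⟩)
    · intro hx
      have hxa : -x ∈ asc := by
        rw [hasc, PySem.List.mem_sorted, hpq, pvMemFoldlCons _ _ _ _ (-x)]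
        rcases hx with hx | hx
        · obtain ⟨i, hi, hix⟩ := (pvMemTakeIff arr1 n hn h1 x).mpr hx
          exact Or.inr ⟨i, PySem.List.mem_pyRange_one.mpr hi, Or.inl (by omega)⟩
        · obtain ⟨i, hi, hix⟩ := (pvMemTakeIff arr2 n hn h2 x).mpr hx
          exact Or.inr ⟨i, PySem.List.mem_pyRange_one.mpr hi, Or.inr (by omega)⟩
      exact List.mem_map.mpr ⟨-x, hxa, by omega⟩
  -- the deduped descending list is strictly decreasing
  have hgt : (PySem.Set.ofList desc).Pairwise (fun a b => b < a) := by
    have hascp : asc.Pairwise (fun a b => a ≤ b) := by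
      rw [hasc]; exact PySem.List.sorted_pairwise pq (fun x => x)
    have hdescp : desc.Pairwise (fun a b => b ≤ a) := by
      rw [hdesc, List.pairwise_map]
      exact hascp.imp (by intro a b h; omega)
    have hle : (PySem.Set.ofList desc).Pairwise (fun a b => b ≤ a) :=
      List.Pairwise.sublist (pvOfListSublist desc) hdescp
    have hne : (PySem.Set.ofList desc).Pairwise (fun a b => a ≠ b) :=
      PySem.Set.nodup_ofList desc
    exact (hle.and hne).imp (by rintro a b ⟨hba, hab⟩; omega)
  -- so it IS B's descending sorted distinct list
  have hkey : PySem.List.sorted distB (fun x => x) true = PySem.Set.ofList desc :=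
    PySem.List.sorted_rev_eq_of_perm_of_pairwise_gt distB (PySem.Set.ofList desc) (fun x => x)
      ((List.perm_ext_iff_of_nodup (PySem.Set.nodup_ofList desc)
        (PySem.Set.nodup_union _ _ (PySem.Set.nodup_ofList _))).mpr hmem) hgt
  -- the distinct pool holds at least n values (Pre_'s last conjunct), so B's
  -- indexing comprehension over range(n) reads the first n of the sorted list
  have hlen : n ≤ ((PySem.List.sorted distB (fun x => x) true).length : Int) := by
    rw [PySem.List.length_sorted]
    have hperm : (PySem.Set.ofList (arr1.take n.toNat ++ arr2.take n.toNat)).Perm distB :=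
      (List.perm_ext_iff_of_nodup (PySem.Set.nodup_ofList _)
        (PySem.Set.nodup_union _ _ (PySem.Set.nodup_ofList _))).mpr (by
          intro x
          rw [PySem.Set.mem_ofList, PySem.Set.mem_union,
              PySem.Set.mem_ofList, PySem.Set.mem_ofList, List.mem_append])
    rw [← hperm.length_eq]
    exact hd
  rw [pvFoldAddGetD (PySem.List.sorted distB (fun x => x) true) n hn hlen, hkey, hA,
      PySem.Set.ofList_eq_self_of_nodup _
        (List.Nodup.sublist (List.take_sublist _ _) (PySem.Set.nodup_ofList desc))]
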